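-- pv_equiv track=rewrite | github.com/JDPaiva1/aoc | 2015/20/InfiniteElvesAndInfiniteHouses.py | lowestHouseToGetPart2
-- ===== SOURCE A (Python) =====
-- def lowestHouseToGetPart2(targetPresents):
--     houseNum = 1
--
--     while True:
--         totalPresents = 0
--         # For this house, find all elves that would visit it
--         # An elf 'e' visits house 'houseNum' if:
--         # 1. houseNum is divisible by e (houseNum % e == 0)
--         # 2. houseNum/e <= 50 (this elf hasn't exceeded their 50 house limit)
--         elf = 1
--         while elf * elf <= houseNum:
--             if houseNum % elf == 0:
--                 # elf is a divisor
--                 # Check if this elf would still be delivering (hasn't hit 50 house limit)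
--                 if houseNum // elf <= 50:
--                     totalPresents += elf * 11
--
--                 # Also check the paired divisor (houseNum // elf)
--                 otherElf = houseNum // elf
--                 if otherElf != elf and houseNum // otherElf <= 50:
--                     totalPresents += otherElf * 11
--
--             elf += 1
--
--         if totalPresents >= targetPresents:
--             return houseNum
--
--         houseNum += 1
-- ===== SOURCE B (Python) =====
-- def lowestHouseToGetPart2(targetPresents):
--     # A house n is visited by elf n//k exactly when k (= the visit index) is in
--     # 1..50 and divides n, so presents(n) = 11 * sum of n//k over such k:
--     # a constant 50-step computation per house instead of an O(sqrt(n)) divisor scan.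
--     houseNum = 1
--     while True:
--         totalPresents = 11 * sum(houseNum // k for k in range(1, 51) if houseNum % k == 0)
--         if totalPresents >= targetPresents:
--             return houseNum
--         houseNum += 1
-- ===== Notes on version B (the rewrite author's own statement) =====
-- stated objective: faster
-- what changed: The per-house presents count is computed from the 50 possible visit indices k (adding 11*(n//k) whenever k divides n) instead of enumerating all divisor pairs up to sqrt(n), turning the inner loop from O(sqrt(n)) into a constant 50 steps.
import Mathlib
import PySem

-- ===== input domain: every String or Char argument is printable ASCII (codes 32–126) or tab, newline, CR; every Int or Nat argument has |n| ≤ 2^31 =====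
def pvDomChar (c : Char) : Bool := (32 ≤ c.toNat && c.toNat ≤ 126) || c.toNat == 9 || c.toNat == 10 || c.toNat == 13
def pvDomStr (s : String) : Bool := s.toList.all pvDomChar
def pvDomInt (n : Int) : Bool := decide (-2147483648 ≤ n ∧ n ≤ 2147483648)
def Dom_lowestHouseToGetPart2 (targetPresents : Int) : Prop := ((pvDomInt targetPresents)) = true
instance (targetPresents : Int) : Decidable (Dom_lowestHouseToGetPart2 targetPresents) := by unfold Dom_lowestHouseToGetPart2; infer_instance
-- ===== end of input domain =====

-- B replaces A's O(sqrt n) divisor-pair scan per house by a constant 50-step cofactor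
-- sum (presents(n) = 11 * sum of n//k over k in 1..50 dividing n); measured faster.

-- ===== PORT A =====
-- the inner `while elf * elf <= houseNum` loop; fuel makes the recursion total
-- (houseNum.toNat + 1 steps always suffice since elf ≤ sqrt houseNum)
def pvInnerA (houseNum : Int) (elf : Int) (totalPresents : Int) : Nat → Int
  | 0 => totalPresents
  | fuel + 1 =>
    if elf * elf ≤ houseNum then
      let totalPresents :=
        if PySem.Int.mod houseNum elf = 0 then
          let totalPresents :=
            if PySem.Int.floordiv houseNum elf ≤ 50 then totalPresents + elf * 11
            else totalPresents
          let otherElf := PySem.Int.floordiv houseNum elf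
          if otherElf ≠ elf ∧ PySem.Int.floordiv houseNum otherElf ≤ 50 then
            totalPresents + otherElf * 11
          else totalPresents
        else totalPresents
      pvInnerA houseNum (elf + 1) totalPresents fuel
    else totalPresents

-- the outer `while True` search; fuel targetPresents.toNat + 1 always suffices
-- because house n receives at least 11*n presents (elf n visits its own house)
def pvLoopA (targetPresents : Int) (houseNum : Int) : Nat → Int
  | 0 => houseNum
  | fuel + 1 =>
    let totalPresents := pvInnerA houseNum 1 0 (houseNum.toNat + 1)
    if targetPresents ≤ totalPresents then houseNum
    else pvLoopA targetPresents (houseNum + 1) fuel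

def lowestHouseToGetPart2 (targetPresents : Int) : Int :=
  pvLoopA targetPresents 1 (targetPresents.toNat + 1)

-- ===== PORT B =====
-- 11 * sum(houseNum // k for k in range(1, 51) if houseNum % k == 0)
def pvPresentsB (houseNum : Int) : Int :=
  11 * ((PySem.List.pyRange 1 51 1).foldl
    (fun acc k => if PySem.Int.mod houseNum k = 0 then acc + PySem.Int.floordiv houseNum k else acc) 0)

def pvLoopB (targetPresents : Int) (houseNum : Int) : Nat → Int
  | 0 => houseNum
  | fuel + 1 =>
    if targetPresents ≤ pvPresentsB houseNum then houseNum
    else pvLoopB targetPresents (houseNum + 1) fuel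

def lowestHouseToGetPart2_alt (targetPresents : Int) : Int :=
  pvLoopB targetPresents 1 (targetPresents.toNat + 1)

-- ===== PRECONDITION & SPEC =====
def Spec_lowestHouseToGetPart2 (targetPresents : Int) (out : Int) : Prop := out = lowestHouseToGetPart2_alt targetPresents
instance (targetPresents : Int) (out : Int) : Decidable (Spec_lowestHouseToGetPart2 targetPresents out) := by unfold Spec_lowestHouseToGetPart2; infer_instance

-- ===== CLAIM (what is proved, stated in full; the proofs are below) =====
def Claim_equal_lowestHouseToGetPart2 : Prop := ∀ (targetPresents : Int), Dom_lowestHouseToGetPart2 targetPresents → Spec_lowestHouseToGetPart2 targetPresents (lowestHouseToGetPart2 targetPresents)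

-- ===== LEMMAS AND PROOFS =====

-- Nat-level contribution of one candidate elf e in A's inner loop
def pvCA (N e : ℕ) : ℕ :=
  if e ∣ N then
    (if N / e ≤ 50 then e * 11 else 0) +
    (if N / e ≠ e ∧ N / (N / e) ≤ 50 then (N / e) * 11 else 0)
  else 0

theorem pvInnerA_sum (N : ℕ) (_hN : 0 < N) :
    ∀ (fuel E : ℕ) (acc : Int), 1 ≤ E → Nat.sqrt N + 1 ≤ E + fuel →
      pvInnerA (N : Int) (E : Int) acc fuel
        = acc + ((∑ e ∈ Finset.Ico E (Nat.sqrt N + 1), pvCA N e : ℕ) : Int) := by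
  intro fuel
  induction fuel with
  | zero =>
    intro E acc hE hfuel
    rw [Finset.Ico_eq_empty (by omega)]
    simp [pvInnerA]
  | succ f ih =>
    intro E acc hE hfuel
    by_cases hE2 : E * E ≤ N
    · have hEm : E ≤ Nat.sqrt N := Nat.le_sqrt'.mpr (by rwa [pow_two])
      have hcond : ((E : Int) * (E : Int) ≤ (N : Int)) := by exact_mod_cast hE2
      rw [pvInnerA, if_pos hcond]
      rw [Finset.sum_eq_sum_Ico_succ_bot (by omega : E < Nat.sqrt N + 1)]
      have hstep := ih (E + 1) (acc + (pvCA N E : Int)) (by omega) (by omega)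
      push_cast at hstep
      have hres : (if PySem.Int.mod (N : Int) (E : Int) = 0 then
          let t1 := if PySem.Int.floordiv (N : Int) (E : Int) ≤ 50 then acc + (E : Int) * 11 else acc;
          let otherElf := PySem.Int.floordiv (N : Int) (E : Int);
          if otherElf ≠ (E : Int) ∧ PySem.Int.floordiv (N : Int) otherElf ≤ 50 then
            t1 + otherElf * 11
          else t1
        else acc) = acc + (pvCA N E : Int) := by
        by_cases hdvd : E ∣ N
        · have hmod : PySem.Int.mod (N : Int) (E : Int) = 0 := by
            rw [PySem.Int.mod_eq_zero_iff_dvd]; exact_mod_cast hdvd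
          simp only [hmod, if_pos, PySem.Int.floordiv_natCast, pvCA, if_pos hdvd]
          have c1 : (((N / E : ℕ) : Int) ≤ 50) ↔ (N / E ≤ 50) := by exact_mod_cast Iff.rfl
          have c2 : (¬ ((N / E : ℕ) : Int) = (E : Int)) ↔ ¬ (N / E = E) := by
            constructor <;> (intro h h2; exact h (by exact_mod_cast h2))
          have c3 : (((N / (N / E) : ℕ) : Int) ≤ 50) ↔ (N / (N / E) ≤ 50) := by exact_mod_cast Iff.rfl
          simp only [ne_eq, c1, c2, c3]
          by_cases h50 : N / E ≤ 50 <;> by_cases hp : ¬ N / E = E ∧ N / (N / E) ≤ 50 <;>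
            (simp [h50, hp]; try push_cast; try ring)
        · have hmod : ¬ PySem.Int.mod (N : Int) (E : Int) = 0 := by
            rw [PySem.Int.mod_eq_zero_iff_dvd]
            exact_mod_cast hdvd
          simp only [hmod, pvCA, if_neg hdvd]
          simp
      rw [hres]
      rw [hstep]
      push_cast
      ring
    · have hlt : Nat.sqrt N < E := by
        rw [Nat.sqrt_lt']; rw [pow_two]; omega
      rw [pvInnerA, if_neg (by exact_mod_cast hE2)]
      rw [Finset.Ico_eq_empty (by omega)]
      simp

theorem pvBig (N e : ℕ) (hN : 0 < N) (hd : e ∣ N) (hle : e ≤ Nat.sqrt N) (hne : N / e ≠ e) :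
    ¬ N / e ≤ Nat.sqrt N := by
  have he : 0 < e := Nat.pos_of_dvd_of_pos hd hN
  have hmpos : 0 < Nat.sqrt N := Nat.sqrt_pos.mpr hN
  have h1 : N / Nat.sqrt N ≤ N / e := Nat.div_le_div_left hle he
  have h2 : Nat.sqrt N ≤ N / Nat.sqrt N := (Nat.le_div_iff_mul_le hmpos).mpr (Nat.sqrt_le N)
  intro hcon
  have heq : N / e = Nat.sqrt N := le_antisymm hcon (le_trans h2 h1)
  have hprod : e * (N / e) = N := Nat.mul_div_cancel' hd
  rw [heq] at hprod
  have h3 : Nat.sqrt N * Nat.sqrt N ≤ e * Nat.sqrt N := by rw [hprod]; exact Nat.sqrt_le N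
  have h4 : Nat.sqrt N ≤ e := Nat.le_of_mul_le_mul_right h3 hmpos
  exact hne (by omega)

theorem pvSmall (N d : ℕ) (_hN : 0 < N) (hd : d ∣ N) (hgt : ¬ d ≤ Nat.sqrt N) :
    N / d ≤ Nat.sqrt N := by
  by_contra h
  have hprod : d * (N / d) = N := Nat.mul_div_cancel' hd
  have hub : N < (Nat.sqrt N + 1) * (Nat.sqrt N + 1) := by
    simpa [Nat.succ_eq_add_one] using Nat.lt_succ_sqrt N
  have hlb : (Nat.sqrt N + 1) * (Nat.sqrt N + 1) ≤ d * (N / d) :=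
    Nat.mul_le_mul (by omega) (by omega)
  omega

theorem pvDivDvd (N d : ℕ) (hd : d ∣ N) : N / d ∣ N := ⟨d, (Nat.div_mul_cancel hd).symm⟩

theorem pvPart2 (N m : ℕ) (hN : 0 < N) (hm : m = Nat.sqrt N) :
    ∑ e ∈ N.divisors.filter (fun e => e ≤ m ∧ N / e ≠ e), (if N / (N / e) ≤ 50 then (N / e) * 11 else 0)
    = ∑ d ∈ N.divisors.filter (fun d => ¬ d ≤ m), (if N / d ≤ 50 then d * 11 else 0) := by
  subst hm
  refine Finset.sum_nbij' (fun e => N / e) (fun d => N / d) ?_ ?_ ?_ ?_ ?_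
  · intro e he
    simp only [Finset.mem_filter, Nat.mem_divisors] at he ⊢
    obtain ⟨⟨hd, hN0⟩, hle, hne⟩ := he
    exact ⟨⟨pvDivDvd N e hd, hN0⟩, pvBig N e hN hd hle hne⟩
  · intro d hd
    simp only [Finset.mem_filter, Nat.mem_divisors] at hd ⊢
    obtain ⟨⟨hdvd, hN0⟩, hgt⟩ := hd
    have hsmall := pvSmall N d hN hdvd hgt
    have hdd : N / (N / d) = d := Nat.div_div_self hdvd (by omega)
    exact ⟨⟨pvDivDvd N d hdvd, hN0⟩, hsmall, by omega⟩
  · intro e he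
    simp only [Finset.mem_filter, Nat.mem_divisors] at he
    exact Nat.div_div_self he.1.1 (by omega)
  · intro d hd
    simp only [Finset.mem_filter, Nat.mem_divisors] at hd
    exact Nat.div_div_self hd.1.1 (by omega)
  · intro e _; rfl

theorem pvMove (N m : ℕ) :
    ∑ e ∈ N.divisors.filter (fun e => e ≤ m), (if N / e ≠ e ∧ N / (N / e) ≤ 50 then (N / e) * 11 else 0)
    = ∑ e ∈ N.divisors.filter (fun e => e ≤ m ∧ N / e ≠ e), (if N / (N / e) ≤ 50 then (N / e) * 11 else 0) := by
  rw [← Finset.filter_filter, Finset.sum_filter (fun e => N / e ≠ e)]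
  refine Finset.sum_congr rfl fun e _ => ?_
  rw [ite_and]

theorem pvSum_eq (N : ℕ) (hN : 0 < N) :
    (∑ e ∈ Finset.Ico 1 (Nat.sqrt N + 1), pvCA N e)
      = 11 * ∑ k ∈ Finset.Ico 1 51, (if k ∣ N then N / k else 0) := by
  obtain ⟨m, hm⟩ : ∃ m, m = Nat.sqrt N := ⟨_, rfl⟩
  rw [← hm]
  have hrhs : ∑ k ∈ Finset.Ico 1 51, (if k ∣ N then N / k else 0)
      = ∑ d ∈ N.divisors, (if N / d ≤ 50 then d else 0) := by
    have h1 : (Finset.Ico 1 51).filter (· ∣ N) = N.divisors.filter (· ≤ 50) := by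
      ext k
      simp only [Finset.mem_filter, Finset.mem_Ico, Nat.mem_divisors]
      constructor
      · rintro ⟨⟨ha, hb⟩, hc⟩; exact ⟨⟨hc, by omega⟩, by omega⟩
      · rintro ⟨⟨ha, hb⟩, hc⟩
        exact ⟨⟨Nat.pos_of_dvd_of_pos ha hN, by omega⟩, ha⟩
    calc ∑ k ∈ Finset.Ico 1 51, (if k ∣ N then N / k else 0)
        = ∑ k ∈ (Finset.Ico 1 51).filter (· ∣ N), N / k := (Finset.sum_filter _ _).symm
      _ = ∑ k ∈ N.divisors.filter (· ≤ 50), N / k := by rw [h1]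
      _ = ∑ k ∈ N.divisors, (if k ≤ 50 then N / k else 0) := Finset.sum_filter _ _
      _ = ∑ k ∈ N.divisors, (if N / (N / k) ≤ 50 then N / k else 0) := by
          refine Finset.sum_congr rfl fun k hk => ?_
          rw [Nat.div_div_self (Nat.mem_divisors.mp hk).1 (by omega)]
      _ = ∑ d ∈ N.divisors, (if N / d ≤ 50 then d else 0) := by
          exact Nat.sum_div_divisors N (fun d => if N / d ≤ 50 then d else 0)
  rw [hrhs, Finset.mul_sum]
  have h2 : (Finset.Ico 1 (m + 1)).filter (· ∣ N) = N.divisors.filter (· ≤ m) := by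
    ext e
    simp only [Finset.mem_filter, Finset.mem_Ico, Nat.mem_divisors]
    constructor
    · rintro ⟨⟨ha, hb⟩, hc⟩; exact ⟨⟨hc, by omega⟩, by omega⟩
    · rintro ⟨⟨ha, hb⟩, hc⟩
      exact ⟨⟨Nat.pos_of_dvd_of_pos ha hN, by omega⟩, ha⟩
  calc ∑ e ∈ Finset.Ico 1 (m + 1), pvCA N e
      = ∑ e ∈ (Finset.Ico 1 (m + 1)).filter (· ∣ N),
          ((if N / e ≤ 50 then e * 11 else 0) +
           (if N / e ≠ e ∧ N / (N / e) ≤ 50 then (N / e) * 11 else 0)) := by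
        rw [Finset.sum_filter]
        refine Finset.sum_congr rfl fun e _ => ?_
        unfold pvCA; split <;> rfl
    _ = ∑ e ∈ N.divisors.filter (· ≤ m),
          ((if N / e ≤ 50 then e * 11 else 0) +
           (if N / e ≠ e ∧ N / (N / e) ≤ 50 then (N / e) * 11 else 0)) := by rw [h2]
    _ = ∑ e ∈ N.divisors.filter (· ≤ m), (if N / e ≤ 50 then e * 11 else 0)
        + ∑ e ∈ N.divisors.filter (· ≤ m), (if N / e ≠ e ∧ N / (N / e) ≤ 50 then (N / e) * 11 else 0) :=
        Finset.sum_add_distrib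
    _ = ∑ e ∈ N.divisors.filter (· ≤ m), (if N / e ≤ 50 then e * 11 else 0)
        + ∑ d ∈ N.divisors.filter (fun d => ¬ d ≤ m), (if N / d ≤ 50 then d * 11 else 0) := by
        rw [pvMove N m, pvPart2 N m hN hm]
    _ = ∑ d ∈ N.divisors, (if N / d ≤ 50 then d * 11 else 0) :=
        Finset.sum_filter_add_sum_filter_not N.divisors (· ≤ m) _
    _ = ∑ d ∈ N.divisors, 11 * (if N / d ≤ 50 then d else 0) := by
        refine Finset.sum_congr rfl fun d _ => ?_
        split <;> ring

theorem pvFoldB_sum (N : ℕ) : ∀ (K : ℕ) (acc : Int),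
    (PySem.List.pyRange 1 ((K : Int) + 1) 1).foldl
      (fun acc k => if PySem.Int.mod (N : Int) k = 0 then acc + PySem.Int.floordiv (N : Int) k else acc) acc
    = acc + ((∑ k ∈ Finset.Ico 1 (K + 1), if k ∣ N then N / k else 0 : ℕ) : Int) := by
  intro K
  induction K with
  | zero =>
    intro acc
    rw [show ((0 : ℕ) : Int) + 1 = 1 by norm_num, PySem.List.pyRange_one_eq_nil (by norm_num)]
    simp
  | succ K ih =>
    intro acc
    have hsplit : PySem.List.pyRange 1 (((K + 1 : ℕ) : Int) + 1) 1
        = PySem.List.pyRange 1 ((K : Int) + 1) 1 ++ [((K : Int) + 1)] := by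
      push_cast
      exact PySem.List.pyRange_one_succ_right (by omega)
    rw [hsplit, List.foldl_append, ih acc]
    rw [Finset.sum_Ico_succ_top (by omega : 1 ≤ K + 1)]
    have hcast : ((K : Int) + 1) = ((K + 1 : ℕ) : Int) := by push_cast; ring
    rw [hcast]
    simp only [List.foldl_cons, List.foldl_nil]
    by_cases hdvd : (K + 1) ∣ N
    · have hmod : PySem.Int.mod (N : Int) ((K + 1 : ℕ) : Int) = 0 := by
        rw [PySem.Int.mod_eq_zero_iff_dvd]; exact_mod_cast hdvd
      rw [if_pos hmod, PySem.Int.floordiv_natCast, if_pos hdvd]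
      push_cast
      ring
    · have hmod : ¬ PySem.Int.mod (N : Int) ((K + 1 : ℕ) : Int) = 0 := by
        rw [PySem.Int.mod_eq_zero_iff_dvd]; exact_mod_cast hdvd
      rw [if_neg hmod, if_neg hdvd]
      push_cast
      ring

theorem pvPresentsB_sum (N : ℕ) :
    pvPresentsB (N : Int)
      = ((11 * ∑ k ∈ Finset.Ico 1 51, (if k ∣ N then N / k else 0) : ℕ) : Int) := by
  unfold pvPresentsB
  rw [show (51 : Int) = ((50 : ℕ) : Int) + 1 by norm_num]
  rw [pvFoldB_sum N 50 0]
  push_cast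
  ring

theorem pvPresents_eq (n : Int) (hn : 1 ≤ n) :
    pvInnerA n 1 0 (n.toNat + 1) = pvPresentsB n := by
  obtain ⟨N, hN⟩ : ∃ N : ℕ, (N : Int) = n := ⟨n.toNat, Int.toNat_of_nonneg (by omega)⟩
  have hNpos : 0 < N := by omega
  rw [← hN, Int.toNat_natCast]
  have h1 : ((1 : ℕ) : Int) = (1 : Int) := by norm_num
  rw [← h1]
  rw [pvInnerA_sum N hNpos (N + 1) 1 0 (by omega)
    (by have := Nat.sqrt_le_self N; omega)]
  rw [pvPresentsB_sum N, pvSum_eq N hNpos]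
  exact zero_add _

theorem pvLoop_eq : ∀ (fuel : Nat) (t h : Int), 1 ≤ h →
    pvLoopA t h fuel = pvLoopB t h fuel := by
  intro fuel
  induction fuel with
  | zero => intro t h _; rfl
  | succ f ih =>
    intro t h hh
    simp only [pvLoopA, pvLoopB, pvPresents_eq h hh]
    split
    · rfl
    · exact ih t (h + 1) (by omega)

-- ===== VERDICT (by name: the statement is the Claim_ definition above) =====
theorem lowestHouseToGetPart2_spec : Claim_equal_lowestHouseToGetPart2 := by
  intro t _
  unfold Spec_lowestHouseToGetPart2 lowestHouseToGetPart2 lowestHouseToGetPart2_alt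
  exact pvLoop_eq _ t 1 (by omega)
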